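-- pv_equiv track=rewrite | github.com/BlenderCN/Learnbgame | All_In_One/addons/modifier_nodes/modgrammar/util.py | best_error_result
-- ===== SOURCE A (Python) =====
-- def best_error_result(err_list):
--   if len(err_list) == 1:
--     # This will be by far the most common case, so check it first.
--     err = err_list[0]
--   else:
--     pos = max((x[0] for x in err_list))
--     nodes = set().union(*(x[1] for x in err_list if x[0] == pos))
--     err = (pos, nodes)
--   return (False, err)
-- ===== SOURCE B (Python) =====
-- def best_error_result(err_list):
--   if len(err_list) == 1:
--     # most common case: return the original element unchanged
--     return (False, err_list[0])
--   pos = None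
--   nodes = set()
--   for x in err_list:
--     if pos is None or x[0] > pos:
--       pos = x[0]
--       nodes = set(x[1])
--     elif x[0] == pos:
--       nodes.update(x[1])
--   return (False, (pos, nodes))
-- ===== Notes on version B (the rewrite author's own statement) =====
-- stated objective: alternative
-- what changed: replaces A's two passes (max over all positions, then a filtered union of the node sets) by one running-max loop that resets the accumulated node set on a new maximum and unions into it on a tie
import Mathlib
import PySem

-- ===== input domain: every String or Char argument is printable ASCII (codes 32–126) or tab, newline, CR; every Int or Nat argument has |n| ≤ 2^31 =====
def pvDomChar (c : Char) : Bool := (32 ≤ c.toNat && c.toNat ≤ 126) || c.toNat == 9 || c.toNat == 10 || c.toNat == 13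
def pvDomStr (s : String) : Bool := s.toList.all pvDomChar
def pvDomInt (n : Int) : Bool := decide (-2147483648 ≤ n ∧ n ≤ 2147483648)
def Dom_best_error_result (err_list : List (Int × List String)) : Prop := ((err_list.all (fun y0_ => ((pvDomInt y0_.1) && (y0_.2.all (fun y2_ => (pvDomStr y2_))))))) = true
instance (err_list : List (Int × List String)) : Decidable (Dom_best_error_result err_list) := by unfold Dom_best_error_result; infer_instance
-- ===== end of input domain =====

-- B replaces A's two passes (max, then filtered union) by a single running-max loop; equal cost, different decomposition.

-- ===== PORT A =====
def best_error_result (err_list : List (Int × List String)) : Bool × (Int × List String) :=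
  if err_list.length = 1 then
    (false, (PySem.List.pyGet? err_list 0).getD (0, []))
  else
    match PySem.List.max? (err_list.map (fun x => x.1)) (fun y => y) with
    | none => (false, (0, []))   -- max() on the empty generator raises ValueError; excluded by Pre_
    | some pos =>
        (false, (pos,
          (err_list.filter (fun x => x.1 == pos)).foldl
            (fun s x => PySem.Set.update s x.2) PySem.Set.empty))

-- ===== PORT B =====
def beStep (st : Option Int × List String) (x : Int × List String) : Option Int × List String :=
  match st.1 with
  | none => (some x.1, PySem.Set.ofList x.2)
  | some p =>
      if x.1 > p then (some x.1, PySem.Set.ofList x.2)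
      else if x.1 == p then (some p, PySem.Set.update st.2 x.2)
      else st

def best_error_result_alt (err_list : List (Int × List String)) : Bool × (Int × List String) :=
  if err_list.length = 1 then
    (false, (PySem.List.pyGet? err_list 0).getD (0, []))
  else
    let st := err_list.foldl beStep (none, PySem.Set.empty)
    (false, (st.1.getD 0, st.2))

-- ===== PRECONDITION & SPEC =====
-- Pre_ excludes only the empty list, on which A raises ValueError (max() of an empty sequence).
def Pre_best_error_result (err_list : List (Int × List String)) : Prop := err_list ≠ []
instance (err_list : List (Int × List String)) : Decidable (Pre_best_error_result err_list) := by unfold Pre_best_error_result; infer_instance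
def pvWitness_best_error_result : (List (Int × List String)) := [(1, ["a"]), (2, ["b", "c"]), (2, ["a"])]

def Spec_best_error_result (err_list : List (Int × List String)) (out : Bool × (Int × List String)) : Prop := out = best_error_result_alt err_list
instance (err_list : List (Int × List String)) (out : Bool × (Int × List String)) : Decidable (Spec_best_error_result err_list out) := by unfold Spec_best_error_result; infer_instance

-- ===== CLAIM (what is proved, stated in full; the proofs are below) =====
def Claim_equal_best_error_result : Prop := ∀ (err_list : List (Int × List String)), Dom_best_error_result err_list → Pre_best_error_result err_list → Spec_best_error_result err_list (best_error_result err_list)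

-- ===== LEMMAS AND PROOFS =====

def beMax (xs : List (Int × List String)) (p : Int) : Int :=
  xs.foldl (fun m x => max m x.1) p

def beCollect (xs : List (Int × List String)) (m : Int) (s : List String) : List String :=
  (xs.filter (fun x => x.1 == m)).foldl (fun s x => PySem.Set.update s x.2) s

theorem le_beMax (xs : List (Int × List String)) (p : Int) : p ≤ beMax xs p := by
  induction xs generalizing p with
  | nil => simp [beMax]
  | cons x t ih =>
      simp only [beMax, List.foldl_cons] at *
      exact le_trans (le_max_left p x.1) (ih (max p x.1))

-- loop invariant for B's fold, starting from an already-initialised state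
theorem beStep_inv (xs : List (Int × List String)) (p : Int) (s : List String) :
    xs.foldl beStep (some p, s) =
      (some (beMax xs p),
       beCollect xs (beMax xs p) (if p = beMax xs p then s else PySem.Set.empty)) := by
  induction xs generalizing p s with
  | nil => simp [beMax, beCollect]
  | cons x t ih =>
      have hM : beMax (x :: t) p = beMax t (max p x.1) := by simp [beMax]
      rcases lt_trichotomy p x.1 with hlt | heq | hgt
      · -- x.1 > p : reset
        have hstep : beStep (some p, s) x = (some x.1, PySem.Set.ofList x.2) := by
          simp [beStep, hlt]
        have hmax : max p x.1 = x.1 := max_eq_right hlt.le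
        rw [List.foldl_cons, hstep, ih, hM, hmax]
        have hpM : p ≠ beMax t x.1 := by
          have := le_beMax t x.1; omega
        rw [if_neg hpM]
        simp only [beCollect, List.filter_cons]
        by_cases hx : x.1 = beMax t x.1
        · have hb : (x.1 == beMax t x.1) = true := by rw [← hx]; simp
          rw [if_pos hx, hb, if_pos rfl, List.foldl_cons]
          rfl
        · have hb : (x.1 == beMax t x.1) = false := by simp [hx]
          rw [if_neg hx, hb, if_neg Bool.false_ne_true]
      · -- x.1 = p : union into the accumulator
        subst heq
        have hstep : beStep (some x.1, s) x = (some x.1, PySem.Set.update s x.2) := by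
          simp [beStep]
        have hmax : max x.1 x.1 = x.1 := max_self x.1
        rw [List.foldl_cons, hstep, ih, hM, hmax]
        simp only [beCollect, List.filter_cons]
        by_cases hx : x.1 = beMax t x.1
        · have hb : (x.1 == beMax t x.1) = true := by rw [← hx]; simp
          rw [if_pos hx, if_pos hx, hb, if_pos rfl, List.foldl_cons]
        · have hb : (x.1 == beMax t x.1) = false := by simp [hx]
          rw [if_neg hx, if_neg hx, hb, if_neg Bool.false_ne_true]
      · -- x.1 < p : skip
        have hstep : beStep (some p, s) x = (some p, s) := by
          have h1 : ¬ x.1 > p := by omega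
          have h2 : (x.1 == p) = false := by simp; omega
          simp [beStep, h1, h2]
        have hmax : max p x.1 = p := max_eq_left hgt.le
        rw [List.foldl_cons, hstep, ih, hM, hmax]
        have hx : (x.1 == beMax t p) = false := by
          have := le_beMax t p
          simp; omega
        simp [beCollect, hx]

theorem max_map_eq_beMax (t : List (Int × List String)) (a : Int) :
    (t.map (fun x => x.1)).foldl max a = beMax t a := by
  rw [beMax, List.foldl_map]

-- ===== VERDICT (by name: the statement is the Claim_ definition above) =====
theorem best_error_result_spec : Claim_equal_best_error_result := by
  intro err_list _ hpre
  unfold Spec_best_error_result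
  cases err_list with
  | nil => exact absurd rfl hpre
  | cons e t =>
      by_cases hlen : (e :: t).length = 1
      · simp [best_error_result, best_error_result_alt, hlen]
      · have hA : PySem.List.max? ((e :: t).map (fun x => x.1)) (fun y => y)
            = some (beMax t e.1) := by
          rw [List.map_cons, PySem.List.max?_id_cons, max_map_eq_beMax]
        have hfirst : beStep (none, PySem.Set.empty) e = (some e.1, PySem.Set.ofList e.2) := by
          simp [beStep]
        have hB := beStep_inv t e.1 (PySem.Set.ofList e.2)
        simp only [best_error_result, best_error_result_alt, if_neg hlen, hA,
          List.foldl_cons, hfirst, hB]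
        simp only [beCollect, List.filter_cons]
        by_cases hx : e.1 = beMax t e.1
        · have hb : (e.1 == beMax t e.1) = true := by rw [← hx]; simp
          rw [if_pos hx, hb, if_pos rfl, List.foldl_cons]
          rfl
        · have hb : (e.1 == beMax t e.1) = false := by simp [hx]
          rw [if_neg hx, hb, if_neg Bool.false_ne_true]
          rfl
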